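-- pv_equiv track=rewrite | github.com/tipech/overlapGraph | sources/console/console.py | _deindent
-- ===== SOURCE A (Python) =====
-- from typing import Callable, Dict, List, Tuple as PyTuple
--
-- def _deindent(text: str) -> List[str]:
--   """
--   Remove text indentation from the given text string.
--
--   Args:
--     text: The text to be processed.
--
--   Returns:
--     The list of unindented text.
--   """
--   lines, indent = text.split('\n'), -1
--
--   for i, line in enumerate(lines):
--     if len(line) == 0 or len(line.lstrip()) == 0:
--       lines[i] = ''
--     elif indent >= 0:
--       lines[i] = line[indent:]
--     else:
--       noind  = line.lstrip()
--       indent = len(line) - len(noind)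
--       lines[i] = noind
--
--   return lines
-- ===== SOURCE B (Python) =====
-- def _deindent(text):
--   """Character-level state machine: one pass over the raw characters, never
--   splitting into lines or calling lstrip/slicing; tracks per-line position,
--   whether a non-space char was seen, and buffers chars past the indent."""
--   out, indent = [], None
--   pos, seen, buf = 0, False, []
--   for ch in text + '\n':          # sentinel newline flushes the last line
--     if ch == '\n':
--       out.append(''.join(buf) if seen else '')
--       pos, seen, buf = 0, False, []
--     else:
--       if not seen and not ch.isspace():
--         seen = True
--         if indent is None:        # first non-blank line fixes the indent
--           indent = pos
--       if indent is not None and pos >= indent: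
--         buf.append(ch)
--       pos += 1
--   return out
-- ===== Notes on version B (the rewrite author's own statement) =====
-- stated objective: alternative
-- what changed: Replaces A's split-into-lines pass with lstrip/slicing per line by a character-level state machine: one scan over the raw characters (with a sentinel newline) tracking per-line position, a seen-non-space flag and a buffer of characters at or past the discovered indent; it never splits the text or slices a line.
import Mathlib
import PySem

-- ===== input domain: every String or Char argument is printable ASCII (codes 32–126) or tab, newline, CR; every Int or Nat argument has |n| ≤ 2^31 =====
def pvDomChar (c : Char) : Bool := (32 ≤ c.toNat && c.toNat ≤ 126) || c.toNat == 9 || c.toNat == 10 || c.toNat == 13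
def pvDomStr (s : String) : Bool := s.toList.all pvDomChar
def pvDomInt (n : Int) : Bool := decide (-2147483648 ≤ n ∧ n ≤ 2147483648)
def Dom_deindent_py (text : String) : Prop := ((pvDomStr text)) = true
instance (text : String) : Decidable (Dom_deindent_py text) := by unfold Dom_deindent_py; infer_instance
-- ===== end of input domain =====

-- B replaces A's split-into-lines-then-lstrip/slice pass by a character-level state machine over the raw text; equal output proved on all inputs.


-- ===== PORT A =====
-- the for-loop over `lines` carrying the mutable `indent` (-1 = not yet found)
def pvALoop : List String → Int → List String
  | [], _ => []
  | l :: ls, indent =>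
    if PySem.Str.len l = 0 ∨ PySem.Str.len (PySem.Str.lstrip l) = 0 then
      "" :: pvALoop ls indent
    else if 0 ≤ indent then
      PySem.Str.slice l (some indent) none :: pvALoop ls indent
    else
      PySem.Str.lstrip l ::
        pvALoop ls (PySem.Str.len l - PySem.Str.len (PySem.Str.lstrip l))

def deindent_py (text : String) : List String :=
  -- text.split('\n'): sep is the non-empty literal "\n", so split? is always `some`
  pvALoop ((PySem.Str.split? text "\n").getD []) (-1)

-- ===== PORT B =====
-- machine state: (out, indent, pos, seen, buf); one step per character of text + '\n'
def pvBChar (st : List String × Option Int × Int × Bool × List Char) (ch : Char) :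
    List String × Option Int × Int × Bool × List Char :=
  let (out, indent, pos, seen, buf) := st
  if ch = '\n' then
    (out ++ [if seen then String.ofList buf else ""], indent, 0, false, [])
  else
    -- if not seen and not ch.isspace(): seen = True; if indent is None: indent = pos
    let seenIndent :=
      if !seen && !(PySem.Chars.isspace ch) then
        (true, match indent with | none => some pos | some i => some i)
      else (seen, indent)
    -- if indent is not None and pos >= indent: buf.append(ch)
    let buf :=
      match seenIndent.2 with
      | some i => if i ≤ pos then buf ++ [ch] else buf
      | none => buf
    (out, seenIndent.2, pos + 1, seenIndent.1, buf)

def deindent_py_alt (text : String) : List String :=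
  ((text.toList ++ ['\n']).foldl pvBChar ([], none, 0, false, [])).1

-- ===== PRECONDITION & SPEC =====
def Spec_deindent_py (text : String) (out : List String) : Prop := out = deindent_py_alt text
instance (text : String) (out : List String) : Decidable (Spec_deindent_py text out) := by unfold Spec_deindent_py; infer_instance

-- ===== CLAIM (what is proved, stated in full; the proofs are below) =====
def Claim_equal_deindent_py : Prop := ∀ (text : String), Dom_deindent_py text → Spec_deindent_py text (deindent_py text)

-- ===== LEMMAS AND PROOFS =====

-- reference splitter: pvSplitAux pre cs = the '\n'-split of cs with pre prepended to the first piece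
def pvSplitAux : List Char → List Char → List (List Char)
  | pre, [] => [pre]
  | pre, c :: r => if c = '\n' then pre :: pvSplitAux [] r else pvSplitAux (pre ++ [c]) r

-- splitOn.go by the single-char separator '\n' is pvSplitAux
lemma pv_go_eq (fuel : Nat) : ∀ (l cur : List Char) (acc : List (List Char)), l.length < fuel →
    PySem.Chars.splitOn.go ['\n'] fuel l cur acc = acc.reverse ++ pvSplitAux cur.reverse l := by
  induction fuel with
  | zero => intro l cur acc h; omega
  | succ n ih =>
    intro l cur acc h
    cases l with
    | nil => simp [PySem.Chars.splitOn.go, pvSplitAux]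
    | cons c r =>
      by_cases hc : c = '\n'
      · subst hc
        rw [show PySem.Chars.splitOn.go ['\n'] (n+1) ('\n'::r) cur acc
              = PySem.Chars.splitOn.go ['\n'] n r [] (cur.reverse :: acc) by
            simp [PySem.Chars.splitOn.go, List.isPrefixOf]]
        rw [ih r [] _ (by simpa using Nat.lt_of_succ_lt_succ h)]
        simp [pvSplitAux]
      · rw [show PySem.Chars.splitOn.go ['\n'] (n+1) (c::r) cur acc
              = PySem.Chars.splitOn.go ['\n'] n r (c :: cur) acc by
            simp [PySem.Chars.splitOn.go, List.isPrefixOf]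
            intro h'; exact absurd h'.symm hc]
        rw [ih r (c :: cur) acc (by simpa using Nat.lt_of_succ_lt_succ h)]
        simp [pvSplitAux, hc]

lemma pv_splitOn_eq (cs : List Char) :
    PySem.Chars.splitOn cs ['\n'] = pvSplitAux [] cs := by
  rw [PySem.Chars.splitOn, pv_go_eq (cs.length + 1) cs [] [] (by omega)]
  rfl

-- one non-newline machine step with a known indent
lemma pvBChar_known (out : List String) (i : Int) (p : Int) (s : Bool) (b : List Char)
    (c : Char) (hc : c ≠ '\n') :
    pvBChar (out, some i, p, s, b) c
      = (out, some i, p + 1, s || !PySem.Chars.isspace c, if i ≤ p then b ++ [c] else b) := by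
  cases s <;> by_cases hsp : PySem.Chars.isspace c <;> simp [pvBChar, hc, hsp]

-- line lemma, indent already known: buf collects the chars at positions ≥ i
lemma pv_line_known (l : List Char) (hnl : '\n' ∉ l) :
    ∀ (i p : Nat) (s : Bool) (b : List Char) (out : List String),
    List.foldl pvBChar (out, some (i : Int), (p : Int), s, b) l
      = (out, some (i : Int), ((p + l.length : Nat) : Int),
          s || l.any (fun c => !PySem.Chars.isspace c), b ++ l.drop (i - p)) := by
  induction l with
  | nil => intro i p s b out; simp
  | cons c r ih =>
    intro i p s b out
    have hc : c ≠ '\n' := fun h => hnl (h ▸ List.mem_cons_self ..)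
    have hr : '\n' ∉ r := fun h => hnl (List.mem_cons_of_mem _ h)
    rw [List.foldl_cons, pvBChar_known _ _ _ _ _ _ hc,
        show ((p : Int) + 1) = ((p + 1 : Nat) : Int) by push_cast; ring,
        ih hr i (p + 1) _ _ out]
    refine Prod.ext rfl (Prod.ext rfl (Prod.ext ?_ (Prod.ext ?_ ?_))) <;> simp only []
    · push_cast [List.length_cons]; ring
    · simp [List.any_cons, Bool.or_assoc]
    · rcases Nat.lt_or_ge p i with hip | hip
      · rw [if_neg (by exact_mod_cast Nat.not_le.mpr hip),
            show i - p = (i - (p + 1)) + 1 by omega]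
        simp
      · rw [if_pos (by exact_mod_cast hip)]
        simp [Nat.sub_eq_zero_of_le hip, Nat.sub_eq_zero_of_le (Nat.le_succ_of_le hip)]

-- line lemma, indent unknown (state is fresh: seen = false, buf = [])
lemma pv_line_unknown (l : List Char) (hnl : '\n' ∉ l) :
    ∀ (p : Nat) (out : List String),
    List.foldl pvBChar (out, none, (p : Int), false, []) l
      = if l.all PySem.Chars.isspace then
          (out, none, ((p + l.length : Nat) : Int), false, [])
        else
          (out, some ((p + (l.takeWhile PySem.Chars.isspace).length : Nat) : Int),
            ((p + l.length : Nat) : Int), true, l.dropWhile PySem.Chars.isspace) := by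
  induction l with
  | nil => intro p out; simp
  | cons c r ih =>
    intro p out
    have hc : c ≠ '\n' := fun h => hnl (h ▸ List.mem_cons_self ..)
    have hr : '\n' ∉ r := fun h => hnl (List.mem_cons_of_mem _ h)
    by_cases hsp : PySem.Chars.isspace c
    · rw [List.foldl_cons,
          show pvBChar (out, none, (p : Int), false, []) c
              = (out, none, ((p : Int) + 1), false, []) by simp [pvBChar, hc, hsp],
          show ((p : Int) + 1) = ((p + 1 : Nat) : Int) by push_cast; ring,
          ih hr (p + 1) out]
      simp only [List.all_cons, hsp, Bool.true_and, List.takeWhile_cons_of_pos hsp,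
        List.dropWhile_cons_of_pos hsp]
      split_ifs with hall
      · refine Prod.ext rfl (Prod.ext rfl (Prod.ext ?_ rfl)); simp only []
        push_cast [List.length_cons]; ring
      · refine Prod.ext rfl (Prod.ext ?_ (Prod.ext ?_ rfl)) <;> simp only []
        · congr 2; simp [List.length_cons]; omega
        · push_cast [List.length_cons]; ring
    · rw [List.foldl_cons,
          show pvBChar (out, none, (p : Int), false, []) c
              = (out, some (p : Int), ((p : Int) + 1), true, [c]) by
            simp [pvBChar, hc, hsp],
          show ((p : Int) + 1) = ((p + 1 : Nat) : Int) by push_cast; ring,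
          pv_line_known r hr p (p + 1) true [c] out]
      simp only [List.all_cons, hsp, Bool.false_and, if_neg Bool.false_ne_true,
        List.takeWhile_cons_of_neg hsp, List.dropWhile_cons_of_neg hsp,
        Nat.sub_eq_zero_of_le (Nat.le_succ p), List.drop_zero]
      refine Prod.ext rfl (Prod.ext ?_ (Prod.ext ?_ rfl)) <;> simp only []
      · simp
      · push_cast [List.length_cons]; ring

-- blank test of A: `len(l) == 0 or len(l.lstrip()) == 0` collapses to the second disjunct
lemma pv_blank_iff (l : String) :
    (PySem.Str.len l = 0 ∨ PySem.Str.len (PySem.Str.lstrip l) = 0) ↔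
      PySem.Str.len (PySem.Str.lstrip l) = 0 := by
  constructor
  · rintro (h | h)
    · have hnil : l.toList = [] := by
        have := PySem.Str.len_eq l
        rw [this] at h
        exact List.eq_nil_of_length_eq_zero (by exact_mod_cast h)
      simp [PySem.Str.len_eq, PySem.Str.toList_lstrip, PySem.Chars.lstrip, hnil]
    · exact h
  · exact Or.inr

-- the A-side optional indent seen by each line, as the Int A carries
def pvIntInd : Option Nat → Int
  | none => -1
  | some i => (i : Int)

-- the indent carried into the next line, and the output A produces for a line
def pvNextInd (ind : Option Nat) (l : List Char) : Option Nat :=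
  if l.all PySem.Chars.isspace then ind
  else some (ind.getD (l.takeWhile PySem.Chars.isspace).length)

def pvOut (ind : Option Nat) (l : List Char) : String :=
  if l.all PySem.Chars.isspace then ""
  else match ind with
    | some i => String.ofList (l.drop i)
    | none => String.ofList (l.dropWhile PySem.Chars.isspace)

-- bridges between A's string primitives on ofList and plain list operations
lemma pv_any_eq (l : List Char) :
    (l.any fun c => !PySem.Chars.isspace c) = !l.all PySem.Chars.isspace := by
  induction l with
  | nil => rfl
  | cons c r ih => simp [List.any_cons, List.all_cons, ih, Bool.not_and]

lemma pv_blank_ofList (cs : List Char) :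
    (PySem.Str.len (String.ofList cs) = 0 ∨
      PySem.Str.len (PySem.Str.lstrip (String.ofList cs)) = 0) ↔
      cs.all PySem.Chars.isspace = true := by
  rw [pv_blank_iff]
  rw [show PySem.Str.len (PySem.Str.lstrip (String.ofList cs))
        = ((cs.dropWhile PySem.Chars.isspace).length : Int) by
      rw [PySem.Str.len_eq, PySem.Str.toList_lstrip]
      simp [PySem.Chars.lstrip]]
  constructor
  · intro h
    have hnil : cs.dropWhile PySem.Chars.isspace = [] :=
      List.eq_nil_of_length_eq_zero (by exact_mod_cast h)
    rw [List.dropWhile_eq_nil_iff] at hnil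
    simpa [List.all_eq_true] using hnil
  · intro h
    have : cs.dropWhile PySem.Chars.isspace = [] := by
      rw [List.dropWhile_eq_nil_iff]
      simpa [List.all_eq_true] using h
    simp [this]

lemma pv_lstrip_ofList (cs : List Char) :
    PySem.Str.lstrip (String.ofList cs) =
      String.ofList (cs.dropWhile PySem.Chars.isspace) := by
  apply String.toList_inj.mp
  rw [PySem.Str.toList_lstrip]
  simp [PySem.Chars.lstrip]

lemma pv_slice_ofList (cs : List Char) (i : Nat) :
    PySem.Str.slice (String.ofList cs) (some (i : Int)) none = String.ofList (cs.drop i) := by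
  apply String.toList_inj.mp
  rw [PySem.Str.toList_slice, PySem.Chars.slice_eq_listSlice]
  simp [PySem.List.slice_from_natCast]

lemma pv_indent_ofList (cs : List Char) :
    PySem.Str.len (String.ofList cs) - PySem.Str.len (PySem.Str.lstrip (String.ofList cs))
      = ((cs.takeWhile PySem.Chars.isspace).length : Int) := by
  rw [PySem.Str.len_eq, PySem.Str.len_eq, pv_lstrip_ofList]
  have h : (cs.takeWhile PySem.Chars.isspace).length
      + (cs.dropWhile PySem.Chars.isspace).length = cs.length := by
    rw [← List.length_append, List.takeWhile_append_dropWhile]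
  simp only [String.toList_ofList]
  omega

-- splitter decomposition
lemma pvSplitAux_no_nl (l : List Char) (hnl : '\n' ∉ l) :
    ∀ pre, pvSplitAux pre l = [pre ++ l] := by
  induction l with
  | nil => intro pre; simp [pvSplitAux]
  | cons c r ih =>
    intro pre
    have hc : c ≠ '\n' := fun h => hnl (h ▸ List.mem_cons_self ..)
    rw [pvSplitAux, if_neg hc, ih (fun h => hnl (List.mem_cons_of_mem _ h))]
    simp

lemma pvSplitAux_break (l r : List Char) (hnl : '\n' ∉ l) :
    ∀ pre, pvSplitAux pre (l ++ '\n' :: r) = (pre ++ l) :: pvSplitAux [] r := by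
  induction l with
  | nil => intro pre; simp [pvSplitAux]
  | cons c t ih =>
    intro pre
    have hc : c ≠ '\n' := fun h => hnl (h ▸ List.mem_cons_self ..)
    rw [List.cons_append, pvSplitAux, if_neg hc, ih (fun h => hnl (List.mem_cons_of_mem _ h))]
    simp

lemma pv_cases (cs : List Char) :
    '\n' ∉ cs ∨ ∃ l r, '\n' ∉ l ∧ cs = l ++ '\n' :: r := by
  induction cs with
  | nil => left; simp
  | cons c t ih =>
    by_cases hc : c = '\n'
    · right; exact ⟨[], t, by simp, by simp [hc]⟩
    · rcases ih with h | ⟨l, r, hl, he⟩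
      · left; simp [Ne.symm hc, h]
      · right; exact ⟨c :: l, r, by simp [hl, Ne.symm hc], by simp [he]⟩

-- one full line plus its newline, on the machine side
lemma pv_machine_line (l : List Char) (hnl : '\n' ∉ l) (out : List String) (ind : Option Nat) :
    List.foldl pvBChar (out, ind.map (Int.ofNat), ((0 : Nat) : Int), false, []) (l ++ ['\n'])
      = (out ++ [pvOut ind l], (pvNextInd ind l).map (Int.ofNat), ((0 : Nat) : Int), false, []) := by
  rw [List.foldl_append]
  cases ind with
  | none =>
    rw [show (Option.map Int.ofNat none) = none from rfl, pv_line_unknown l hnl 0 out]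
    by_cases hall : l.all PySem.Chars.isspace
    · simp [hall, pvBChar, pvOut, pvNextInd]
    · simp [hall, pvBChar, pvOut, pvNextInd]
  | some i =>
    rw [show (Option.map Int.ofNat (some i)) = some ((i : Nat) : Int) from rfl,
        pv_line_known l hnl i 0 false [] out]
    by_cases hall : l.all PySem.Chars.isspace
    · simp [pvBChar, pv_any_eq, hall, pvOut, pvNextInd]
    · simp [pvBChar, pv_any_eq, hall, pvOut, pvNextInd]

-- the same line, on A's side
lemma pv_aloop_line (l : List Char) (ind : Option Nat) (ls : List String) :
    pvALoop (String.ofList l :: ls) (pvIntInd ind)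
      = pvOut ind l :: pvALoop ls (pvIntInd (pvNextInd ind l)) := by
  by_cases hall : l.all PySem.Chars.isspace
  · rw [pvALoop, if_pos ((pv_blank_ofList l).mpr hall)]
    simp [pvOut, pvNextInd, hall]
  · have hnb : ¬ (PySem.Str.len (String.ofList l) = 0 ∨
        PySem.Str.len (PySem.Str.lstrip (String.ofList l)) = 0) := by
      rw [pv_blank_ofList]; exact hall
    cases ind with
    | none =>
      rw [pvALoop, if_neg hnb, if_neg (by norm_num [pvIntInd]), pv_indent_ofList,
          pv_lstrip_ofList]
      simp [pvOut, pvNextInd, hall, pvIntInd]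
    | some i =>
      rw [pvALoop, if_neg hnb, if_pos (by simp [pvIntInd]),
          show pvIntInd (some i) = ((i : Nat) : Int) from rfl, pv_slice_ofList]
      simp [pvOut, pvNextInd, hall, pvIntInd]

-- main lemma: the machine over cs ++ ['\n'] produces exactly A's per-line outputs
lemma pv_main : ∀ (n : Nat) (cs : List Char), cs.length ≤ n → ∀ (out : List String) (ind : Option Nat),
    List.foldl pvBChar (out, ind.map (Int.ofNat), ((0 : Nat) : Int), false, []) (cs ++ ['\n'])
      = (out ++ pvALoop ((pvSplitAux [] cs).map String.ofList) (pvIntInd ind),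
          (List.foldl (fun j l => pvNextInd j l) ind (pvSplitAux [] cs)).map (Int.ofNat),
          ((0 : Nat) : Int), false, []) := by
  intro n
  induction n with
  | zero =>
    intro cs h out ind
    have : cs = [] := List.eq_nil_of_length_eq_zero (Nat.le_zero.mp h)
    subst this
    rw [pv_machine_line [] (by simp) out ind]
    simp [pvSplitAux, pvALoop, pvOut]
  | succ n ih =>
    intro cs h out ind
    rcases pv_cases cs with hnl | ⟨l, r, hl, he⟩
    · rw [pv_machine_line cs hnl out ind, pvSplitAux_no_nl cs hnl []]
      simp [pv_aloop_line, pvALoop]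
    · subst he
      rw [show (l ++ '\n' :: r) ++ ['\n'] = (l ++ ['\n']) ++ (r ++ ['\n']) by simp,
          List.foldl_append, pv_machine_line l hl out ind,
          ih r (by simp at h; omega) (out ++ [pvOut ind l]) (pvNextInd ind l),
          pvSplitAux_break l r hl []]
      simp [pv_aloop_line]

-- ===== VERDICT (by name: the statement is the Claim_ definition above) =====
theorem deindent_py_spec : Claim_equal_deindent_py := by
  intro text _
  unfold Spec_deindent_py deindent_py deindent_py_alt
  rw [show (PySem.Str.split? text "\n").getD []
        = (pvSplitAux [] text.toList).map String.ofList by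
      have h := PySem.Str.split?_map text "\n"
      rw [show "\n".toList = ['\n'] from rfl] at h
      rw [PySem.Chars.split?, if_neg (by simp), pv_splitOn_eq] at h
      cases hs : PySem.Str.split? text "\n" with
      | none => rw [hs] at h; simp at h
      | some xs =>
        rw [hs] at h
        simp only [Option.map_some, Option.some.injEq] at h
        simp only [Option.getD_some]
        apply List.ext_getElem (by simpa using congrArg List.length h)
        intro i h1 h2
        simp only [List.getElem_map]
        apply String.toList_inj.mp
        rw [String.toList_ofList]
        have h3 : i < (List.map String.toList xs).length := by simpa using h1
        calc xs[i].toList = (List.map String.toList xs)[i]'h3 := by simp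
          _ = (pvSplitAux [] text.toList)[i]'(by simpa using h2) := List.getElem_of_eq h h3]
  rw [show (([], none, 0, false, []) :
        List String × Option Int × Int × Bool × List Char)
        = ([], (none : Option Nat).map Int.ofNat, ((0 : Nat) : Int), false, []) by simp,
      pv_main text.toList.length text.toList le_rfl [] none]
  simp [pvIntInd]
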